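-- pv_equiv track=rewrite | github.com/willfind/nimble | nimble/core/data/dataHelpers.py | makeNamesLines
-- ===== SOURCE A (Python) =====
-- import math
--
-- DEFAULT_PREFIX = "_DEFAULT_#"
--
-- def indicesSplit(allowed, total):
--     """
--     Given the total length of a list, and a limit to
--     how many indices we are allowed to display, return
--     two lists of indices defining a middle ommision.
--     In the tupple return, the first list are positive indices
--     growing up from zero. The second list are negative indices
--     growing up to negative one.
--     """
--     if total > allowed:
--         allowed -= 1
--
--     if allowed == 1 or total == 1:
--         return ([0], [])
--
--     forward = int(math.ceil(allowed / 2.0))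
--     backward = int(math.floor(allowed / 2.0))
--
--     fIndices = list(range(forward))
--     bIndices = list(range(-backward, 0))
--
--     for i in range(len(bIndices)):
--         bIndices[i] = bIndices[i] + total
--
--     if fIndices[len(fIndices) - 1] == bIndices[0]:
--         bIndices = bIndices[1:]
--
--     return (fIndices, bIndices)
--
-- def makeNamesLines(indent, maxW, numDisplayNames, count, namesList, nameType):
--     """
--     Helper for __repr__ in Base.
--     """
--     if not namesList:
--         return ''
--     namesString = ""
--     (posL, posR) = indicesSplit(numDisplayNames, count)
--     possibleIndices = posL + posR
--
--     if namesList is None: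
--         allDefault = True
--     else:
--         allDefault = all([namesList[i].startswith(DEFAULT_PREFIX)
--                           for i in possibleIndices])
--
--     if allDefault:
--         return ""
--
--     currNamesString = indent + nameType + '={'
--     newStartString = indent * 2
--     prevIndex = -1
--     for i in range(len(possibleIndices)):
--         currIndex = possibleIndices[i]
--         # means there was a gap, need to insert elipses
--         if currIndex - prevIndex > 1:
--             addition = '..., '
--             if len(currNamesString) + len(addition) > maxW:
--                 namesString += currNamesString + '\n'
--                 currNamesString = newStartString
--             currNamesString += addition
--         prevIndex = currIndex
--
--         # get name and truncate if needed
--         fullName = namesList[currIndex]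
--         currName = fullName
--         if len(currName) > 11:
--             currName = currName[:8] + '...'
--         addition = "'" + currName + "':" + str(currIndex)
--
--         # if it isn't the last entry, comma and space. if it is
--         # the end-cbrace
--         addition += ', ' if i != (len(possibleIndices) - 1) else '}'
--
--         # if adding this would put us above the limit, add the line
--         # to namesString before, and start a new line
--         if len(currNamesString) + len(addition) > maxW:
--             namesString += currNamesString + '\n'
--             currNamesString = newStartString
--
--         currNamesString += addition
--
--     namesString += currNamesString + '\n'
--     return namesString
-- ===== SOURCE B (Python) =====
-- import math
--
-- DEFAULT_PREFIX = "_DEFAULT_#"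
--
-- def indicesSplit(allowed, total):
--     if total > allowed:
--         allowed -= 1
--     if allowed == 1 or total == 1:
--         return ([0], [])
--     forward = int(math.ceil(allowed / 2.0))
--     backward = int(math.floor(allowed / 2.0))
--     fIndices = list(range(forward))
--     bIndices = list(range(-backward, 0))
--     for i in range(len(bIndices)):
--         bIndices[i] = bIndices[i] + total
--     if fIndices[len(fIndices) - 1] == bIndices[0]:
--         bIndices = bIndices[1:]
--     return (fIndices, bIndices)
--
-- def makeNamesLines(indent, maxW, numDisplayNames, count, namesList, nameType):
--     """
--     Helper for __repr__ in Base: two-pass variant (build fragments, then wrap).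
--     """
--     if not namesList:
--         return ''
--     posL, posR = indicesSplit(numDisplayNames, count)
--     possibleIndices = posL + posR
--     if all(namesList[i].startswith(DEFAULT_PREFIX) for i in possibleIndices):
--         return ""
--     # pass 1: the ordered list of fragments to emit
--     frags = []
--     prevIndex = -1
--     last = len(possibleIndices) - 1
--     for i, currIndex in enumerate(possibleIndices):
--         if currIndex - prevIndex > 1:
--             frags.append('..., ')
--         prevIndex = currIndex
--         name = namesList[currIndex]
--         if len(name) > 11:
--             name = name[:8] + '...'
--         frags.append("'" + name + "':" + str(currIndex)
--                      + (', ' if i != last else '}'))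
--     # pass 2: greedy line wrapping of the fragments
--     namesString = ""
--     curr = indent + nameType + '={'
--     for frag in frags:
--         if len(curr) + len(frag) > maxW:
--             namesString += curr + '\n'
--             curr = indent * 2
--         curr += frag
--     return namesString + curr + '\n'
-- ===== Notes on version B (the rewrite author's own statement) =====
-- stated objective: alternative
-- what changed: B replaces A's single fused loop carrying three pieces of state (prevIndex, accumulated output, current line) with two passes: first build the ordered list of fragments ('..., ' markers and truncated "'name':index" tokens with their trailing ', ' or '}'), then a separate greedy line-wrapping fold over that fragment list.
import Mathlib
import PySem

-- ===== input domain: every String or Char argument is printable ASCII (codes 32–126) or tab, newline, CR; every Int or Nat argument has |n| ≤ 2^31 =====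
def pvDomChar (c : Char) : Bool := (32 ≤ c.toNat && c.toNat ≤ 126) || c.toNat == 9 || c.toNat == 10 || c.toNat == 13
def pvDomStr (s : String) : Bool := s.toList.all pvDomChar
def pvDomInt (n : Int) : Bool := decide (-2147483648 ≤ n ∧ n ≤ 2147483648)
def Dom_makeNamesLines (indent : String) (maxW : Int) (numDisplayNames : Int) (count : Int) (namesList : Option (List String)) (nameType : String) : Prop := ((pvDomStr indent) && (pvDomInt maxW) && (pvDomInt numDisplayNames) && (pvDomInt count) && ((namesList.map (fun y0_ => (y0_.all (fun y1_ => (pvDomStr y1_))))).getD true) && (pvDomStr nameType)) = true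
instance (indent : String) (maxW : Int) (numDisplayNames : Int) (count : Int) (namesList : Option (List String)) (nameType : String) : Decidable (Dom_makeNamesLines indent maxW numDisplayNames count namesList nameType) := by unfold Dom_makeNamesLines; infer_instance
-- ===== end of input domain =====

-- B replaces A's fused loop (three-part state) with two passes — build the fragment list, then greedily wrap it; same output, same cost.


-- ===== PORT A =====
def pvDefaultPrefix : String := "_DEFAULT_#"

-- shared helper: literal port of indicesSplit (used verbatim by both Pythons).
-- int(math.ceil(allowed/2.0)) = floordiv (allowed+1) 2 (exact: /2.0 is exact in binary for |n| ≤ 2^31);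
-- the two out-of-range reads fIndices[-1+len]/bIndices[0] (Python IndexError) are pyGetD 0 here — excluded by Pre_.
def indicesSplitPy (allowed total : Int) : List Int × List Int :=
  let allowed := if total > allowed then allowed - 1 else allowed
  if allowed = 1 ∨ total = 1 then ([0], [])
  else
    let forward := PySem.Int.floordiv (allowed + 1) 2
    let backward := PySem.Int.floordiv allowed 2
    let fIndices := PySem.List.pyRange 0 forward 1
    let bIndices := (PySem.List.pyRange (-backward) 0 1).map (· + total)
    if PySem.List.pyGetD fIndices (fIndices.length - 1) 0 = PySem.List.pyGetD bIndices 0 0 then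
      (fIndices, PySem.List.slice bIndices (some 1) none)
    else
      (fIndices, bIndices)

-- A's for-loop: one fused pass over the indices carrying (prevIndex, namesString, currNamesString);
-- 'i != len(possibleIndices) - 1' is consumed sequentially, so it is 'rest ≠ []'.
def makeNamesLinesLoopA (maxW : Int) (newStartString : String) (xs : List String) :
    List Int → Int → String → String → String
  | [], _, namesString, currNamesString => namesString ++ currNamesString ++ "\n"
  | currIndex :: rest, prevIndex, namesString, currNamesString =>
    let st :=
      if currIndex - prevIndex > 1 then
        let addition := "..., "
        if PySem.Str.len currNamesString + PySem.Str.len addition > maxW then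
          (namesString ++ currNamesString ++ "\n", newStartString ++ addition)
        else
          (namesString, currNamesString ++ addition)
      else (namesString, currNamesString)
    let fullName := PySem.List.pyGetD xs currIndex ""
    let currName :=
      if PySem.Str.len fullName > 11 then PySem.Str.slice fullName none (some 8) ++ "..." else fullName
    let addition :=
      "'" ++ currName ++ "':" ++ PySem.Int.toStr currIndex ++ (if rest = [] then "}" else ", ")
    let st' :=
      if PySem.Str.len st.2 + PySem.Str.len addition > maxW then
        (st.1 ++ st.2 ++ "\n", newStartString ++ addition)
      else
        (st.1, st.2 ++ addition)
    makeNamesLinesLoopA maxW newStartString xs rest currIndex st'.1 st'.2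

def makeNamesLines (indent : String) (maxW : Int) (numDisplayNames : Int) (count : Int) (namesList : Option (List String)) (nameType : String) : String :=
  match namesList with
  | none => ""          -- 'if not namesList'
  | some xs =>
    if xs = [] then ""  -- 'if not namesList'
    else
      let ps := indicesSplitPy numDisplayNames count
      let possibleIndices := ps.1 ++ ps.2
      -- 'namesList is None' is unreachable here (caught by the early return): the else branch computes all([...])
      let allDefault :=
        (possibleIndices.map (fun i => PySem.Str.startswith (PySem.List.pyGetD xs i "") pvDefaultPrefix)).all (fun b => b)
      if allDefault then ""
      else
        makeNamesLinesLoopA maxW (indent ++ indent) xs possibleIndices (-1) "" (indent ++ nameType ++ "={")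

-- ===== PORT B =====
-- pass 1: the ordered fragment list ('..., ' markers and "'name':index" tokens with ', '/'}')
def makeNamesLinesFrags (xs : List String) : List Int → Int → List String
  | [], _ => []
  | currIndex :: rest, prevIndex =>
    let name := PySem.List.pyGetD xs currIndex ""
    let name := if PySem.Str.len name > 11 then PySem.Str.slice name none (some 8) ++ "..." else name
    (if currIndex - prevIndex > 1 then ["..., "] else []) ++
      ["'" ++ name ++ "':" ++ PySem.Int.toStr currIndex ++ (if rest = [] then "}" else ", ")] ++
      makeNamesLinesFrags xs rest currIndex

-- pass 2: greedy line wrapping, one fold over the fragments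
def makeNamesLinesWrap (maxW : Int) (newStart : String) (st : String × String) (frag : String) : String × String :=
  if PySem.Str.len st.2 + PySem.Str.len frag > maxW then
    (st.1 ++ st.2 ++ "\n", newStart ++ frag)
  else
    (st.1, st.2 ++ frag)

def makeNamesLines_alt (indent : String) (maxW : Int) (numDisplayNames : Int) (count : Int) (namesList : Option (List String)) (nameType : String) : String :=
  match namesList with
  | none => ""
  | some xs =>
    if xs = [] then ""
    else
      let ps := indicesSplitPy numDisplayNames count
      let possibleIndices := ps.1 ++ ps.2
      if possibleIndices.all (fun i => PySem.Str.startswith (PySem.List.pyGetD xs i "") pvDefaultPrefix) then ""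
      else
        let frags := makeNamesLinesFrags xs possibleIndices (-1)
        let st := frags.foldl (makeNamesLinesWrap maxW (indent ++ indent)) ("", indent ++ nameType ++ "={")
        st.1 ++ st.2 ++ "\n"

-- ===== PRECONDITION & SPEC =====
-- Pre_ excludes exactly the inputs on which Python A raises IndexError: a non-empty namesList whose
-- produced display indices reach outside [-len, len) (or numDisplayNames so small that indicesSplit
-- itself indexes an empty list). It excludes no input on which A returns.
def Pre_makeNamesLines (indent : String) (maxW : Int) (numDisplayNames : Int) (count : Int) (namesList : Option (List String)) (nameType : String) : Prop :=
  match namesList with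
  | none => True
  | some xs =>
    xs = [] ∨
      (if count > numDisplayNames then numDisplayNames - 1 else numDisplayNames) = 1 ∨ count = 1 ∨
        (2 ≤ (if count > numDisplayNames then numDisplayNames - 1 else numDisplayNames) ∧
          PySem.Int.floordiv ((if count > numDisplayNames then numDisplayNames - 1 else numDisplayNames) + 1) 2 ≤ (xs.length : Int) ∧
          ((if PySem.Int.floordiv ((if count > numDisplayNames then numDisplayNames - 1 else numDisplayNames) + 1) 2 - 1 = count - PySem.Int.floordiv (if count > numDisplayNames then numDisplayNames - 1 else numDisplayNames) 2 then count - PySem.Int.floordiv (if count > numDisplayNames then numDisplayNames - 1 else numDisplayNames) 2 + 1 else count - PySem.Int.floordiv (if count > numDisplayNames then numDisplayNames - 1 else numDisplayNames) 2) > count - 1 ∨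
            (-(xs.length : Int) ≤ (if PySem.Int.floordiv ((if count > numDisplayNames then numDisplayNames - 1 else numDisplayNames) + 1) 2 - 1 = count - PySem.Int.floordiv (if count > numDisplayNames then numDisplayNames - 1 else numDisplayNames) 2 then count - PySem.Int.floordiv (if count > numDisplayNames then numDisplayNames - 1 else numDisplayNames) 2 + 1 else count - PySem.Int.floordiv (if count > numDisplayNames then numDisplayNames - 1 else numDisplayNames) 2) ∧ count - 1 < (xs.length : Int))))
instance (indent : String) (maxW : Int) (numDisplayNames : Int) (count : Int) (namesList : Option (List String)) (nameType : String) : Decidable (Pre_makeNamesLines indent maxW numDisplayNames count namesList nameType) := by unfold Pre_makeNamesLines; cases namesList <;> infer_instance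

def pvWitness_makeNamesLines : String × Int × Int × Int × Option (List String) × String :=
  ("  ", 79, 3, 4, some ["a", "b", "c", "d"], "pointNames")

def Spec_makeNamesLines (indent : String) (maxW : Int) (numDisplayNames : Int) (count : Int) (namesList : Option (List String)) (nameType : String) (out : String) : Prop := out = makeNamesLines_alt indent maxW numDisplayNames count namesList nameType
instance (indent : String) (maxW : Int) (numDisplayNames : Int) (count : Int) (namesList : Option (List String)) (nameType : String) (out : String) : Decidable (Spec_makeNamesLines indent maxW numDisplayNames count namesList nameType out) := by unfold Spec_makeNamesLines; infer_instance

-- ===== CLAIM (what is proved, stated in full; the proofs are below) =====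
def Claim_equal_makeNamesLines : Prop := ∀ (indent : String) (maxW : Int) (numDisplayNames : Int) (count : Int) (namesList : Option (List String)) (nameType : String), Dom_makeNamesLines indent maxW numDisplayNames count namesList nameType → Pre_makeNamesLines indent maxW numDisplayNames count namesList nameType → Spec_makeNamesLines indent maxW numDisplayNames count namesList nameType (makeNamesLines indent maxW numDisplayNames count namesList nameType)

-- ===== LEMMAS AND PROOFS =====
-- fold fusion: A's fused loop equals B's wrap-fold over B's fragment list, for every state
lemma loopA_eq_wrap_frags (maxW : Int) (newStart : String) (xs : List String) :
    ∀ (inds : List Int) (prev : Int) (ns curr : String),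
      makeNamesLinesLoopA maxW newStart xs inds prev ns curr =
        (let st := (makeNamesLinesFrags xs inds prev).foldl (makeNamesLinesWrap maxW newStart) (ns, curr)
         st.1 ++ st.2 ++ "\n") := by
  intro inds
  induction inds with
  | nil => intro prev ns curr; simp [makeNamesLinesLoopA, makeNamesLinesFrags]
  | cons i rest ih =>
    intro prev ns curr
    simp only [makeNamesLinesLoopA, makeNamesLinesFrags, List.foldl_append, List.foldl_cons,
      List.foldl_nil, ih]
    by_cases hgap : i - prev > 1
    · simp [hgap, makeNamesLinesWrap]
    · simp [hgap, makeNamesLinesWrap]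

theorem makeNamesLines_eq_alt (indent : String) (maxW : Int) (numDisplayNames : Int) (count : Int) (namesList : Option (List String)) (nameType : String) :
    makeNamesLines indent maxW numDisplayNames count namesList nameType =
      makeNamesLines_alt indent maxW numDisplayNames count namesList nameType := by
  cases namesList with
  | none => rfl
  | some xs =>
    simp only [makeNamesLines, makeNamesLines_alt, List.all_map, Function.comp_def]
    -- (the two allDefault tests become syntactically identical)
    split_ifs with h1 h2
    · rfl
    · rfl
    · exact loopA_eq_wrap_frags _ _ _ _ _ _ _

-- ===== VERDICT (by name: the statement is the Claim_ definition above) =====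
theorem makeNamesLines_spec : Claim_equal_makeNamesLines := by
  intro indent maxW numDisplayNames count namesList nameType _ _
  unfold Spec_makeNamesLines
  exact makeNamesLines_eq_alt indent maxW numDisplayNames count namesList nameType
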